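-- pv_equiv track=rewrite | github.com/pypi-data/pypi-mirror-390 | packages/commoneval/commoneval-0.2.1.tar.gz/commoneval-0.2.1/commoneval/util/gleu.py | gleu
-- ===== SOURCE A (Python) =====
-- from collections import Counter
--
-- def gleu(seq1: tuple[str], seq2: tuple[str], n: int = 2) -> dict[str, int]:
--     def ngrams(seq, n):
--         return [tuple(seq[i : i + n]) for i in range(len(seq) - n + 1)]
--
--     ngrams1 = Counter(ngrams(seq1, n))
--     ngrams2 = Counter(ngrams(seq2, n))
--
--     true_positive = 0
--     false_positive = 0
--     false_negative = 0
--
--     for ng in ngrams1: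
--         if ng in ngrams2:
--             true_positive += min(ngrams1[ng], ngrams2[ng])
--             if ngrams1[ng] > ngrams2[ng]:
--                 false_negative += ngrams1[ng] - ngrams2[ng]
--             elif ngrams2[ng] > ngrams1[ng]:
--                 false_positive += ngrams2[ng] - ngrams1[ng]
--         else:
--             false_negative += ngrams1[ng]
--
--     for ng in ngrams2:
--         if ng not in ngrams1:
--             false_positive += ngrams2[ng]
--
--     return {
--         "true_positive": true_positive,
--         "false_positive": false_positive,
--         "false_negative": false_negative,
--     }
-- ===== SOURCE B (Python) =====
-- def gleu(seq1, seq2, n=2):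
--     def ngrams(seq, n):
--         return [tuple(seq[i : i + n]) for i in range(len(seq) - n + 1)]
--
--     g1 = sorted(ngrams(seq1, n))
--     g2 = sorted(ngrams(seq2, n))
--     tp = 0
--     i = 0
--     j = 0
--     while i < len(g1) and j < len(g2):
--         if g1[i] == g2[j]:
--             tp += 1
--             i += 1
--             j += 1
--         elif g1[i] < g2[j]:
--             i += 1
--         else:
--             j += 1
--     return {
--         "true_positive": tp,
--         "false_positive": len(g2) - tp,
--         "false_negative": len(g1) - tp,
--     }
-- ===== Notes on version B (the rewrite author's own statement) =====
-- stated objective: alternative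
-- what changed: B drops the Counters and the per-key conditional accounting entirely: it sorts the two n-gram lists, counts the multiset intersection with a two-pointer merge (tp), and obtains false_positive/false_negative as the closed forms len(g2)-tp and len(g1)-tp.
import Mathlib
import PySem

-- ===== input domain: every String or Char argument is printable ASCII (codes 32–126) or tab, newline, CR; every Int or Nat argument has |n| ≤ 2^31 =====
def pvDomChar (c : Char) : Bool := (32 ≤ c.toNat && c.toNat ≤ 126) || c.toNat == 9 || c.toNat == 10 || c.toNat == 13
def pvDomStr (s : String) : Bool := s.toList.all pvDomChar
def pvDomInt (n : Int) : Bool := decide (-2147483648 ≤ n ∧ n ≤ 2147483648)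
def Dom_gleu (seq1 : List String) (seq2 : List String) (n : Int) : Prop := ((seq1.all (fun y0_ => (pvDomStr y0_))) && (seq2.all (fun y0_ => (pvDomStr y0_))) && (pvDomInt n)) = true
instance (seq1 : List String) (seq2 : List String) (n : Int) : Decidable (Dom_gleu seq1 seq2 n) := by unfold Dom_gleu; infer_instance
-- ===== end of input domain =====

-- B drops A's Counters and per-key branching: it sorts the two n-gram lists, counts the
-- multiset intersection with a two-pointer merge, and derives false_positive/false_negative
-- as closed forms from the list lengths; objective: alternative algorithm.

-- ===== PORT A =====
-- the inner helper 'ngrams' both Pythons contain verbatim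
def gleuNgrams (seq : List String) (n : Int) : List (List String) :=
  (PySem.List.pyRange 0 ((seq.length : Int) - n + 1) 1).map
    (fun i => PySem.List.slice seq (some i) (some (i + n)))

def gleu (seq1 : List String) (seq2 : List String) (n : Int) : List (String × Int) :=
  let ngrams1 := PySem.Dict.counter (gleuNgrams seq1 n)
  let ngrams2 := PySem.Dict.counter (gleuNgrams seq2 n)
  let acc := ngrams1.keys.foldl (fun (acc : Int × Int × Int) ng =>
      if ngrams2.contains ng then
        let tp := acc.1 + min (ngrams1.getD ng 0) (ngrams2.getD ng 0)
        if ngrams1.getD ng 0 > ngrams2.getD ng 0 then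
          (tp, acc.2.1, acc.2.2 + (ngrams1.getD ng 0 - ngrams2.getD ng 0))
        else if ngrams2.getD ng 0 > ngrams1.getD ng 0 then
          (tp, acc.2.1 + (ngrams2.getD ng 0 - ngrams1.getD ng 0), acc.2.2)
        else (tp, acc.2.1, acc.2.2)
      else (acc.1, acc.2.1, acc.2.2 + ngrams1.getD ng 0)) (0, 0, 0)
  let fp := ngrams2.keys.foldl (fun fp ng =>
      if !ngrams1.contains ng then fp + ngrams2.getD ng 0 else fp) acc.2.1
  [("true_positive", acc.1), ("false_positive", fp), ("false_negative", acc.2.2)]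

-- ===== PORT B =====
-- B's while loop over indices i, j and the accumulator tp, phrased as the obvious
-- tail recursion on the two suffixes g1[i:], g2[j:] carrying tp
def mergeTP : Int → List (List String) → List (List String) → Int
  | tp, [], _ => tp
  | tp, _ :: _, [] => tp
  | tp, a :: t1, b :: t2 =>
    if a = b then mergeTP (tp + 1) t1 t2
    else if a < b then mergeTP tp t1 (b :: t2)
    else mergeTP tp (a :: t1) t2
termination_by _ s t => s.length + t.length

-- Python's sorted() on tuples, ported as mergeSort under the lexicographic order
-- (by-identity sorting under a total order has a unique result, so any sort is exact)
def gleu_alt (seq1 : List String) (seq2 : List String) (n : Int) : List (String × Int) :=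
  let g1 := (gleuNgrams seq1 n).mergeSort (fun a b => decide (a ≤ b))
  let g2 := (gleuNgrams seq2 n).mergeSort (fun a b => decide (a ≤ b))
  let tp := mergeTP 0 g1 g2
  [("true_positive", tp),
   ("false_positive", (g2.length : Int) - tp),
   ("false_negative", (g1.length : Int) - tp)]

-- ===== PRECONDITION & SPEC =====
def Spec_gleu (seq1 : List String) (seq2 : List String) (n : Int) (out : List (String × Int)) : Prop := out = gleu_alt seq1 seq2 n
instance (seq1 : List String) (seq2 : List String) (n : Int) (out : List (String × Int)) : Decidable (Spec_gleu seq1 seq2 n out) := by unfold Spec_gleu; infer_instance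

-- ===== CLAIM (what is proved, stated in full; the proofs are below) =====
def Claim_equal_gleu : Prop := ∀ (seq1 : List String) (seq2 : List String) (n : Int), Dom_gleu seq1 seq2 n → Spec_gleu seq1 seq2 n (gleu seq1 seq2 n)

-- ===== LEMMAS AND PROOFS =====

-- A's first loop, with both accumulating counters abstracted
theorem foldA_eq (c1 c2 : PySem.Dict (List String) Int) (L : List (List String))
    (tp fp fn : Int) :
    L.foldl (fun (acc : Int × Int × Int) ng =>
      if c2.contains ng then
        let tp := acc.1 + min (c1.getD ng 0) (c2.getD ng 0)
        if c1.getD ng 0 > c2.getD ng 0 then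
          (tp, acc.2.1, acc.2.2 + (c1.getD ng 0 - c2.getD ng 0))
        else if c2.getD ng 0 > c1.getD ng 0 then
          (tp, acc.2.1 + (c2.getD ng 0 - c1.getD ng 0), acc.2.2)
        else (tp, acc.2.1, acc.2.2)
      else (acc.1, acc.2.1, acc.2.2 + c1.getD ng 0)) (tp, fp, fn)
    = (tp + (L.map (fun ng => if c2.contains ng then min (c1.getD ng 0) (c2.getD ng 0) else 0)).sum,
       fp + (L.map (fun ng => if c2.contains ng then (if c2.getD ng 0 > c1.getD ng 0 then c2.getD ng 0 - c1.getD ng 0 else 0) else 0)).sum,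
       fn + (L.map (fun ng => if c2.contains ng then (if c1.getD ng 0 > c2.getD ng 0 then c1.getD ng 0 - c2.getD ng 0 else 0) else (c1.getD ng 0))).sum) := by
  induction L generalizing tp fp fn with
  | nil => simp
  | cons x t ih =>
    simp only [List.foldl_cons, List.map_cons, List.sum_cons]
    split_ifs with h1 h2 h3 <;> rw [ih] <;> refine Prod.ext ?_ (Prod.ext ?_ ?_) <;> simp <;> omega

-- A's second loop
theorem foldFP_eq (c1 c2 : PySem.Dict (List String) Int) (L : List (List String)) (fp : Int) :
    L.foldl (fun fp ng => if !c1.contains ng then fp + c2.getD ng 0 else fp) fp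
    = fp + (L.map (fun ng => if !c1.contains ng then c2.getD ng 0 else 0)).sum := by
  induction L generalizing fp with
  | nil => simp
  | cons x t ih =>
    simp only [List.foldl_cons, List.map_cons, List.sum_cons]
    by_cases h : c1.contains x = true <;> simp only [h, Bool.not_true, Bool.not_false] <;>
      simp only [if_true, if_false, Bool.false_eq_true] <;>
      rw [ih] <;> omega

-- (a :: t1) ∩ (a :: t2) = a ::ₘ (t1 ∩ t2) on coerced multisets
theorem count_cons_inter_cons (a : List String) (t1 t2 : List (List String)) :
    ((a :: t1 : List (List String)) : Multiset (List String)) ∩ ((a :: t2 : List (List String)) : Multiset (List String))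
    = a ::ₘ (((t1 : List (List String)) : Multiset (List String)) ∩ (t2 : Multiset (List String))) := by
  rw [← Multiset.cons_coe, ← Multiset.cons_coe]
  ext x
  simp only [Multiset.count_inter, Multiset.count_cons]
  by_cases hx : x = a <;> simp [hx]

theorem inter_drop_left (a : List String) (t1 : List (List String)) (t : List (List String))
    (h : a ∉ t) :
    ((a :: t1 : List (List String)) : Multiset (List String)) ∩ (t : Multiset (List String))
    = ((t1 : List (List String)) : Multiset (List String)) ∩ (t : Multiset (List String)) := by
  rw [← Multiset.cons_coe]
  exact Multiset.cons_inter_of_neg _ (by simpa using h)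

theorem inter_drop_right (b : List String) (s : List (List String)) (t2 : List (List String))
    (h : b ∉ s) :
    ((s : List (List String)) : Multiset (List String)) ∩ ((b :: t2 : List (List String)) : Multiset (List String))
    = ((s : List (List String)) : Multiset (List String)) ∩ (t2 : Multiset (List String)) := by
  rw [← Multiset.cons_coe]
  ext x
  simp only [Multiset.count_inter, Multiset.count_cons]
  by_cases hx : x = b
  · subst hx
    have h0 : Multiset.count x ((s : List (List String)) : Multiset (List String)) = 0 :=
      Multiset.count_eq_zero.2 (by simpa using h)
    simp only [h0]
    simp
  · simp [hx]

-- the two-pointer merge on sorted lists counts the multiset intersection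
theorem mergeTP_eq (acc : Int) (s t : List (List String))
    (hs : s.Pairwise (· ≤ ·)) (ht : t.Pairwise (· ≤ ·)) :
    mergeTP acc s t = acc + (((s : Multiset (List String)) ∩ (t : Multiset (List String))).card : Int) := by
  fun_induction mergeTP acc s t with
  | case1 acc t => simp
  | case2 acc a t1 => simp
  | case3 acc a t1 t2 ih =>
    rw [count_cons_inter_cons, Multiset.card_cons, ih hs.tail ht.tail]
    push_cast; ring
  | case4 acc a t1 b t2 =>
    rename_i hne hlt ih
    have hnotmem : a ∉ (b :: t2) := by
      intro hmem
      rcases List.mem_cons.1 hmem with rfl | hm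
      · exact absurd hlt (lt_irrefl a)
      · have := (List.pairwise_cons.1 ht).1 a hm
        exact absurd (lt_of_lt_of_le hlt this) (lt_irrefl a)
    rw [inter_drop_left _ _ _ hnotmem]
    exact ih hs.tail ht
  | case5 acc a t1 b t2 =>
    rename_i hne hnlt ih
    have hblta : b < a := lt_of_le_of_ne (not_lt.1 hnlt) (fun h => hne h.symm)
    have hnotmem : b ∉ (a :: t1) := by
      intro hmem
      rcases List.mem_cons.1 hmem with rfl | hm
      · exact absurd hblta (lt_irrefl b)
      · have := (List.pairwise_cons.1 hs).1 b hm
        exact absurd (lt_of_lt_of_le hblta this) (lt_irrefl b)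
    rw [inter_drop_right _ _ _ hnotmem]
    exact ih hs ht.tail

-- count with the ambient BEq instance = Multiset count of the coercion
theorem mcount_eq (a : List String) (l : List (List String)) :
    Multiset.count a (↑l) = List.count a l := by
  rw [Multiset.coe_count]
  unfold List.count
  refine List.countP_congr ?_
  intro x _
  constructor <;> intro h <;> simp_all [beq_iff_eq]

-- bridge: sum of f over set(l) = Finset sum over l.toFinset
theorem sum_ofList_eq (l : List (List String)) (f : List String → Int) :
    ((PySem.Set.ofList l).map f).sum = ∑ a ∈ l.toFinset, f a := by
  rw [← List.sum_toFinset f (PySem.Set.nodup_ofList l)]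
  congr 1
  ext a
  simp [PySem.Set.mem_ofList]

theorem sum_count_eq (l : List (List String)) :
    (∑ a ∈ l.toFinset, (List.count a l : Int)) = (l.length : Int) := by
  have h := Multiset.toFinset_sum_count_eq (l : Multiset (List String))
  simp only [List.toFinset_coe, mcount_eq, Multiset.coe_card] at h
  exact_mod_cast congrArg (fun m : ℕ => (m : Int)) h

theorem card_inter_eq (l1 l2 : List (List String)) :
    (((l1 : Multiset (List String)) ∩ (l2 : Multiset (List String))).card : Int)
    = ∑ a ∈ l1.toFinset, (min (List.count a l1) (List.count a l2) : Int) := by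
  have h1 : ((l1 : Multiset (List String)) ∩ l2).card
      = ∑ a ∈ ((l1 : Multiset (List String)) ∩ l2).toFinset,
          Multiset.count a ((l1 : Multiset (List String)) ∩ l2) :=
    (Multiset.toFinset_sum_count_eq _).symm
  have hsub : ((l1 : Multiset (List String)) ∩ l2).toFinset ⊆ l1.toFinset := by
    intro a ha
    simp only [Multiset.mem_toFinset, Multiset.mem_inter] at ha
    simpa [List.mem_toFinset] using ha.1
  have h2 : ∑ a ∈ ((l1 : Multiset (List String)) ∩ l2).toFinset,
      Multiset.count a ((l1 : Multiset (List String)) ∩ l2)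
      = ∑ a ∈ l1.toFinset, Multiset.count a ((l1 : Multiset (List String)) ∩ l2) := by
    refine Finset.sum_subset hsub ?_
    intro a _ ha
    exact Multiset.count_eq_zero.2 (fun hm => ha (Multiset.mem_toFinset.2 hm))
  rw [h1, h2]
  push_cast
  refine Finset.sum_congr rfl ?_
  intro a _
  rw [Multiset.count_inter, mcount_eq, mcount_eq]
  push_cast
  rfl

theorem msort_pairwise (l : List (List String)) :
    (l.mergeSort (fun a b => decide (a ≤ b))).Pairwise (· ≤ ·) := by
  have h := List.pairwise_mergeSort (le := fun a b : List String => decide (a ≤ b))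
    (by intro a b c hab hbc; simp only [decide_eq_true_eq] at *; exact le_trans hab hbc)
    (by intro a b; simpa using le_total a b) l
  simpa using h

theorem msort_perm (l : List (List String)) :
    (l.mergeSort (fun a b => decide (a ≤ b))).Perm l :=
  List.mergeSort_perm l _

theorem gleu_spec : Claim_equal_gleu := by
  intro seq1 seq2 n _
  unfold Spec_gleu gleu gleu_alt
  set l1 := gleuNgrams seq1 n with hl1
  set l2 := gleuNgrams seq2 n with hl2
  simp only [foldA_eq, PySem.Dict.keys_counter, foldFP_eq]
  simp only [PySem.Dict.getD_counter, PySem.Dict.contains_counter, List.length_mergeSort,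
    zero_add, List.cons.injEq, Prod.mk.injEq, true_and, and_true]
  -- the merge over the sorted lists counts the multiset intersection
  have hc1 : ((l1.mergeSort (fun a b => decide (a ≤ b)) : List (List String)) : Multiset (List String)) = (l1 : Multiset (List String)) :=
    Multiset.coe_eq_coe.2 (msort_perm l1)
  have hc2 : ((l2.mergeSort (fun a b => decide (a ≤ b)) : List (List String)) : Multiset (List String)) = (l2 : Multiset (List String)) :=
    Multiset.coe_eq_coe.2 (msort_perm l2)
  have hm : mergeTP 0 (l1.mergeSort (fun a b => decide (a ≤ b))) (l2.mergeSort (fun a b => decide (a ≤ b)))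
      = ∑ a ∈ l1.toFinset, (min (List.count a l1) (List.count a l2) : Int) := by
    rw [mergeTP_eq _ _ _ (msort_pairwise l1) (msort_pairwise l2), hc1, hc2, card_inter_eq, zero_add]
  refine ⟨?_, ?_, ?_⟩
  · -- true_positive
    rw [sum_ofList_eq, hm]
    refine Finset.sum_congr rfl ?_
    intro a ha
    by_cases h2 : a ∈ l2
    · have hcont : l2.contains a = true := by simpa using h2
      rw [if_pos hcont]
    · have hcont : l2.contains a = false := by simpa using h2
      have h0 : List.count a l2 = 0 := List.count_eq_zero.2 h2
      rw [hcont, h0]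
      simp
  · -- false_positive
    rw [sum_ofList_eq, sum_ofList_eq, hm]
    have hF1U : l1.toFinset ⊆ (l1 ++ l2).toFinset := by
      intro a; simp_all
    have hF2U : l2.toFinset ⊆ (l1 ++ l2).toFinset := by
      intro a; simp_all
    -- the first loop's fp part, as a guarded sum over the union
    have e1 : (∑ a ∈ (l1 ++ l2).toFinset, (if a ∈ l1 then
          (if l2.contains a = true then
            (if ((List.count a l2 : Int)) > ((List.count a l1 : Int)) then ((List.count a l2 : Int)) - ((List.count a l1 : Int)) else 0) else 0) else 0))
        = ∑ a ∈ l1.toFinset, (if l2.contains a = true then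
          (if ((List.count a l2 : Int)) > ((List.count a l1 : Int)) then ((List.count a l2 : Int)) - ((List.count a l1 : Int)) else 0) else 0) := by
      rw [← Finset.sum_subset hF1U (by
        intro a _ ha
        rw [if_neg (fun hmem => ha (List.mem_toFinset.2 hmem))])]
      refine Finset.sum_congr rfl ?_
      intro a ha
      rw [if_pos (List.mem_toFinset.1 ha)]
    -- the second loop, as a guarded sum over the union
    have e2 : (∑ a ∈ (l1 ++ l2).toFinset, (if a ∈ l1 then 0 else ((List.count a l2 : Int))))
        = ∑ a ∈ l2.toFinset, (if (!l1.contains a) = true then ((List.count a l2 : Int)) else 0) := by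
      rw [← Finset.sum_subset hF2U (by
        intro a _ ha
        have h0 : List.count a l2 = 0 := List.count_eq_zero.2 (fun hmem => ha (List.mem_toFinset.2 hmem))
        rw [h0]
        simp)]
      refine Finset.sum_congr rfl ?_
      intro a _
      by_cases h1 : a ∈ l1
      · simp [h1]
      · simp [h1]
    rw [← e1, ← e2, ← Finset.sum_add_distrib]
    -- pointwise: guard(a ∈ l1) + guard(a ∉ l1) = count₂ - min
    have e3 : ∀ a ∈ (l1 ++ l2).toFinset,
        ((if a ∈ l1 then
          (if l2.contains a = true then
            (if ((List.count a l2 : Int)) > ((List.count a l1 : Int)) then ((List.count a l2 : Int)) - ((List.count a l1 : Int)) else 0) else 0) else 0)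
         + (if a ∈ l1 then 0 else ((List.count a l2 : Int))))
        = ((List.count a l2 : Int)) - (min (List.count a l1) (List.count a l2) : Int) := by
      intro a _
      by_cases h1 : a ∈ l1
      · by_cases h2 : a ∈ l2
        · have hcont : l2.contains a = true := by simpa using h2
          simp only [if_pos h1, hcont, if_true]
          split_ifs <;> omega
        · have hcont : l2.contains a = false := by simpa using h2
          have h0 : List.count a l2 = 0 := List.count_eq_zero.2 h2
          simp [h1, h0]
      · have h0 : List.count a l1 = 0 := List.count_eq_zero.2 h1
        simp [h1, h0]
    rw [Finset.sum_congr rfl e3, Finset.sum_sub_distrib]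
    -- ∑ count₂ over the union = |l2|, ∑ min over the union = ∑ min over l1.toFinset
    have e4 : (∑ a ∈ (l1 ++ l2).toFinset, ((List.count a l2 : Int))) = (l2.length : Int) := by
      rw [← sum_count_eq l2]
      rw [← Finset.sum_subset hF2U (by
        intro a _ ha
        have h0 : List.count a l2 = 0 := List.count_eq_zero.2 (fun hmem => ha (List.mem_toFinset.2 hmem))
        rw [h0]
        rfl)]
    have e5 : (∑ a ∈ (l1 ++ l2).toFinset, (min (List.count a l1) (List.count a l2) : Int))
        = ∑ a ∈ l1.toFinset, (min (List.count a l1) (List.count a l2) : Int) := by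
      rw [← Finset.sum_subset hF1U (by
        intro a _ ha
        have h0 : List.count a l1 = 0 := List.count_eq_zero.2 (fun hmem => ha (List.mem_toFinset.2 hmem))
        rw [h0]
        simp)]
    rw [e4, e5]
  · -- false_negative
    rw [sum_ofList_eq, hm]
    have e1 : ∀ a ∈ l1.toFinset,
        (if l2.contains a = true then
          (if ((List.count a l1 : Int)) > ((List.count a l2 : Int)) then ((List.count a l1 : Int)) - ((List.count a l2 : Int)) else 0)
         else ((List.count a l1 : Int)))
        = ((List.count a l1 : Int)) - (min (List.count a l1) (List.count a l2) : Int) := by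
      intro a _
      by_cases h2 : a ∈ l2
      · have hcont : l2.contains a = true := by simpa using h2
        simp only [hcont, if_true]
        split_ifs <;> omega
      · have hcont : l2.contains a = false := by simpa using h2
        have h0 : List.count a l2 = 0 := List.count_eq_zero.2 h2
        rw [hcont, h0]
        simp
    rw [Finset.sum_congr rfl e1, Finset.sum_sub_distrib, sum_count_eq]
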